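-- pv_equiv track=rewrite | github.com/mtailanian-digitalsense/wys-backend-module-layout | Layout_App/SmartLayout.py | get_category_max_dims
-- ===== SOURCE A (Python) =====
-- def get_category_max_dims(inlist):
--     cat_max_dims = {}
--     for mod in inlist:
--         cat_id = mod[4]
--         cat_max_dims[cat_id] = {} if cat_id not in cat_max_dims else cat_max_dims[cat_id]
--         cat_max_dims[cat_id]['max_width'] = mod[2] if 'max_width' not in cat_max_dims[cat_id] else max(mod[2], cat_max_dims[cat_id]['max_width'])
--         cat_max_dims[cat_id]['max_height'] = mod[3] if 'max_height' not in cat_max_dims[cat_id] else max(mod[3], cat_max_dims[cat_id]['max_height'])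
--         cat_max_dims[cat_id]['max_area'] = cat_max_dims[cat_id]['max_width']*cat_max_dims[cat_id]['max_height']
--     return cat_max_dims
-- ===== SOURCE B (Python) =====
-- def get_category_max_dims(inlist):
--     groups = {}
--     for mod in inlist:
--         groups.setdefault(mod[4], []).append(mod)
--     result = {}
--     for cat_id, mods in groups.items():
--         max_width = max(m[2] for m in mods)
--         max_height = max(m[3] for m in mods)
--         result[cat_id] = {'max_width': max_width,
--                          'max_height': max_height,
--                          'max_area': max_width * max_height}
--     return result
-- ===== Notes on version B (the rewrite author's own statement) =====
-- stated objective: alternative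
-- what changed: A's single fused pass keeping per-category running maxima is replaced by a two-phase group-then-aggregate: first build a dict of per-category row lists, then compute each category's max width/height (and their product) once per group.
import Mathlib
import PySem

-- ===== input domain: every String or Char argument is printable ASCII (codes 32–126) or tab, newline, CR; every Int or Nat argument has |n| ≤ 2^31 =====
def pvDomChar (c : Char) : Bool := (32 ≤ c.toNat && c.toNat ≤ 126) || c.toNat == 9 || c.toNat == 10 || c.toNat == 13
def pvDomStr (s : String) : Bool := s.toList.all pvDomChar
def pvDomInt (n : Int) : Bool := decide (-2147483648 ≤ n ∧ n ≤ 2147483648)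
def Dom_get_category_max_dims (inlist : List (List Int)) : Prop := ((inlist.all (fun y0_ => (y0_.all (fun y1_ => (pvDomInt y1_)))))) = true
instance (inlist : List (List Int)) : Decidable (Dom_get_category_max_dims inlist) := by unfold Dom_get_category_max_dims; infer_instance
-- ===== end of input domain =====

-- B replaces A's single fused pass (per-category running maxima updated row by row) by a
-- group-then-aggregate two-phase computation: build a dict of per-category row lists, then
-- compute each category's maxima once (objective: alternative decomposition, similar cost).

-- ===== PORT A =====
-- one loop iteration of A: update the per-category dict of running maxima
def pvStepA (cat_max_dims : PySem.Dict Int (PySem.Dict String Int)) (mod : List Int) :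
    PySem.Dict Int (PySem.Dict String Int) :=
  let cat_id := PySem.List.pyGetD mod 4 0          -- mod[4]; exact under Pre_ (index in range)
  let inner0 := if cat_max_dims.contains cat_id then cat_max_dims.getD cat_id PySem.Dict.empty
                else PySem.Dict.empty
  let inner1 := inner0.insert "max_width"
    (if inner0.contains "max_width" = false then PySem.List.pyGetD mod 2 0
     else max (PySem.List.pyGetD mod 2 0) (inner0.getD "max_width" 0))
  let inner2 := inner1.insert "max_height"
    (if inner1.contains "max_height" = false then PySem.List.pyGetD mod 3 0
     else max (PySem.List.pyGetD mod 3 0) (inner1.getD "max_height" 0))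
  let inner3 := inner2.insert "max_area" (inner2.getD "max_width" 0 * inner2.getD "max_height" 0)
  cat_max_dims.insert cat_id inner3

def get_category_max_dims (inlist : List (List Int)) : List (Int × List (String × Int)) :=
  ((inlist.foldl pvStepA PySem.Dict.empty).items).map (fun p => (p.1, p.2.items))

-- ===== PORT B =====
-- max(xs) for a nonempty list of ints (the grouped lists are never empty)
def pvMaxInt (xs : List Int) : Int := (PySem.List.max? xs id).getD 0

-- the inner dict B builds for one category from its grouped rows
def pvAgg (mods : List (List Int)) : PySem.Dict String Int :=
  let w := pvMaxInt (mods.map (fun m => PySem.List.pyGetD m 2 0))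
  let h := pvMaxInt (mods.map (fun m => PySem.List.pyGetD m 3 0))
  PySem.Dict.mk [("max_width", w), ("max_height", h), ("max_area", w * h)]

-- one grouping iteration: groups.setdefault(mod[4], []).append(mod)
def pvStepG (g : PySem.Dict Int (List (List Int))) (mod : List Int) :
    PySem.Dict Int (List (List Int)) :=
  g.modify (PySem.List.pyGetD mod 4 0) [] (· ++ [mod])

def get_category_max_dims_alt (inlist : List (List Int)) : List (Int × List (String × Int)) :=
  let groups := inlist.foldl pvStepG PySem.Dict.empty
  let result := groups.items.foldl (fun r p => r.insert p.1 (pvAgg p.2)) PySem.Dict.empty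
  result.items.map (fun p => (p.1, p.2.items))

-- ===== PRECONDITION & SPEC =====
-- Pre_ excludes exactly the inputs where A raises IndexError: a row shorter than 5 elements.
def Pre_get_category_max_dims (inlist : List (List Int)) : Prop :=
  ∀ mod ∈ inlist, 5 ≤ mod.length
instance (inlist : List (List Int)) : Decidable (Pre_get_category_max_dims inlist) := by
  unfold Pre_get_category_max_dims; infer_instance

def pvWitness_get_category_max_dims : List (List Int) :=
  [[1, 1, 3, 2, 7], [2, 1, 5, 1, 7], [0, 0, 2, 9, 3]]

def Spec_get_category_max_dims (inlist : List (List Int)) (out : List (Int × List (String × Int))) : Prop := out = get_category_max_dims_alt inlist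
instance (inlist : List (List Int)) (out : List (Int × List (String × Int))) : Decidable (Spec_get_category_max_dims inlist out) := by unfold Spec_get_category_max_dims; infer_instance

-- ===== CLAIM (what is proved, stated in full; the proofs are below) =====
def Claim_equal_get_category_max_dims : Prop := ∀ (inlist : List (List Int)), Dom_get_category_max_dims inlist → Pre_get_category_max_dims inlist → Spec_get_category_max_dims inlist (get_category_max_dims inlist)

-- ===== LEMMAS AND PROOFS =====

-- the A-side dict that corresponds to a grouping dict g
def pvMapAgg (g : PySem.Dict Int (List (List Int))) : PySem.Dict Int (PySem.Dict String Int) :=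
  PySem.Dict.mk (g.items.map (fun p => (p.1, pvAgg p.2)))

lemma pvMapAgg_contains (g : PySem.Dict Int (List (List Int))) (k : Int) :
    (pvMapAgg g).contains k = g.contains k := by
  simp [pvMapAgg, PySem.Dict.contains, List.any_map, Function.comp_def]

lemma pvMapAgg_get? (g : PySem.Dict Int (List (List Int))) (k : Int) :
    (pvMapAgg g).get? k = (g.get? k).map pvAgg := by
  simp [pvMapAgg, PySem.Dict.get?, List.find?_map, Function.comp_def, Option.map_map]

lemma pvMax?_cons : ∀ (ys : List Int) (x : Int),
    PySem.List.max? (x :: ys) id = some (ys.foldl max x) := by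
  intro ys
  induction ys with
  | nil => intro x; rfl
  | cons y t ih =>
      intro x
      by_cases h : x < y
      · have h1 : PySem.List.max? (x :: y :: t) id = PySem.List.max? (y :: t) id := by
          show List.foldl _ (if x < y then some y else some x) t = List.foldl _ (some y) t
          rw [if_pos h]
        rw [h1, ih, List.foldl_cons, max_eq_right h.le]
      · have h1 : PySem.List.max? (x :: y :: t) id = PySem.List.max? (x :: t) id := by
          show List.foldl _ (if x < y then some y else some x) t = List.foldl _ (some x) t
          rw [if_neg h]
        rw [h1, ih, List.foldl_cons, max_eq_left (not_lt.mp h)]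

lemma pvMaxInt_cons (x : Int) (ys : List Int) : pvMaxInt (x :: ys) = ys.foldl max x := by
  rw [pvMaxInt, pvMax?_cons]; rfl

lemma pvMaxInt_append (xs : List Int) (a : Int) (h : xs ≠ []) :
    pvMaxInt (xs ++ [a]) = max (pvMaxInt xs) a := by
  obtain ⟨x, t, rfl⟩ := List.exists_cons_of_ne_nil h
  rw [List.cons_append, pvMaxInt_cons, pvMaxInt_cons, List.foldl_append, List.foldl_cons,
    List.foldl_nil]

lemma pvAgg_append (mods : List (List Int)) (mod : List Int) (h : mods ≠ []) :
    pvAgg (mods ++ [mod]) =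
      PySem.Dict.mk [("max_width", max (PySem.List.pyGetD mod 2 0)
                        (pvMaxInt (mods.map (fun m => PySem.List.pyGetD m 2 0)))),
                     ("max_height", max (PySem.List.pyGetD mod 3 0)
                        (pvMaxInt (mods.map (fun m => PySem.List.pyGetD m 3 0)))),
                     ("max_area", max (PySem.List.pyGetD mod 2 0)
                        (pvMaxInt (mods.map (fun m => PySem.List.pyGetD m 2 0))) *
                        max (PySem.List.pyGetD mod 3 0)
                        (pvMaxInt (mods.map (fun m => PySem.List.pyGetD m 3 0))))] := by
  have hne : mods.map (fun m => PySem.List.pyGetD m 2 0) ≠ [] := by simp [h]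
  have hne' : mods.map (fun m => PySem.List.pyGetD m 3 0) ≠ [] := by simp [h]
  simp [pvAgg, pvMaxInt_append _ _ hne, pvMaxInt_append _ _ hne', max_comm]

-- A's inner-dict update chain, named for the proof (definitionally the body of pvStepA)
def pvInnerStep (inner0 : PySem.Dict String Int) (w h : Int) : PySem.Dict String Int :=
  let inner1 := inner0.insert "max_width"
    (if inner0.contains "max_width" = false then w else max w (inner0.getD "max_width" 0))
  let inner2 := inner1.insert "max_height"
    (if inner1.contains "max_height" = false then h else max h (inner1.getD "max_height" 0))
  inner2.insert "max_area" (inner2.getD "max_width" 0 * inner2.getD "max_height" 0)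

lemma pvInnerStep_empty (mod : List Int) :
    pvInnerStep PySem.Dict.empty (PySem.List.pyGetD mod 2 0) (PySem.List.pyGetD mod 3 0)
      = pvAgg [mod] := by
  simp [pvInnerStep, pvAgg, pvMaxInt_cons, PySem.Dict.insert, PySem.Dict.contains,
    PySem.Dict.getD, PySem.Dict.get?, PySem.Dict.empty]

lemma pvInnerStep_agg (mods : List (List Int)) (mod : List Int) (h : mods ≠ []) :
    pvInnerStep (pvAgg mods) (PySem.List.pyGetD mod 2 0) (PySem.List.pyGetD mod 3 0)
      = pvAgg (mods ++ [mod]) := by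
  rw [pvAgg_append _ _ h]
  simp [pvInnerStep, pvAgg, PySem.Dict.insert, PySem.Dict.contains,
    PySem.Dict.getD, PySem.Dict.get?]

-- one step: A's fused update equals grouping followed by aggregation
lemma pvStep_comm (g : PySem.Dict Int (List (List Int))) (mod : List Int)
    (hnd : g.keys.Nodup) (hne : ∀ p ∈ g.items, p.2 ≠ []) :
    pvStepA (pvMapAgg g) mod = pvMapAgg (pvStepG g mod) := by
  have hA : pvStepA (pvMapAgg g) mod
      = (pvMapAgg g).insert (PySem.List.pyGetD mod 4 0)
          (pvInnerStep
            (if (pvMapAgg g).contains (PySem.List.pyGetD mod 4 0) then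
              (pvMapAgg g).getD (PySem.List.pyGetD mod 4 0) PySem.Dict.empty
             else PySem.Dict.empty)
            (PySem.List.pyGetD mod 2 0) (PySem.List.pyGetD mod 3 0)) := rfl
  rw [hA, pvStepG, PySem.Dict.modify]
  by_cases hcont : g.contains (PySem.List.pyGetD mod 4 0) = true
  · -- category already present
    have hget : g.get? (PySem.List.pyGetD mod 4 0)
        = some (g.getD (PySem.List.pyGetD mod 4 0) []) := by
      rw [PySem.Dict.contains_eq_isSome_get?] at hcont
      obtain ⟨old, hold⟩ := Option.isSome_iff_exists.mp hcont
      rw [PySem.Dict.getD_eq_get?_getD, hold]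
      simp
    have hold_ne : g.getD (PySem.List.pyGetD mod 4 0) [] ≠ [] :=
      hne (PySem.List.pyGetD mod 4 0, g.getD (PySem.List.pyGetD mod 4 0) [])
        (PySem.Dict.mem_items_of_get?_eq_some g hget)
    have hMA : (pvMapAgg g).getD (PySem.List.pyGetD mod 4 0) PySem.Dict.empty
        = pvAgg (g.getD (PySem.List.pyGetD mod 4 0) []) := by
      rw [PySem.Dict.getD_eq_get?_getD, pvMapAgg_get?, hget]
      rfl
    rw [if_pos (by rw [pvMapAgg_contains]; exact hcont), hMA, pvInnerStep_agg _ _ hold_ne]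
    apply PySem.Dict.ext
    rw [PySem.Dict.items_insert_of_contains _ _ (by rw [pvMapAgg_contains]; exact hcont)]
    rw [pvMapAgg, pvMapAgg]
    show (List.map _ g.items).map _ = List.map _ (PySem.Dict.insert g _ _).items
    rw [PySem.Dict.items_insert_of_contains _ _ hcont, List.map_map, List.map_map]
    apply List.map_congr_left
    intro p hp
    obtain ⟨pk, pv⟩ := p
    by_cases hpc : pk = PySem.List.pyGetD mod 4 0
    · have h2 : g.get? pk = some pv := PySem.Dict.get?_of_mem_items g hp hnd
      rw [hpc, hget] at h2
      have hpold : pv = g.getD (PySem.List.pyGetD mod 4 0) [] := (Option.some.inj h2).symm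
      subst hpc; subst hpold
      simp
    · simp [hpc]
  · -- fresh category
    have hcont' : g.contains (PySem.List.pyGetD mod 4 0) = false := by simpa using hcont
    have hgetD : g.getD (PySem.List.pyGetD mod 4 0) [] = [] :=
      PySem.Dict.getD_of_not_contains _ _ hcont'
    rw [if_neg (by rw [pvMapAgg_contains, hcont']; simp), pvInnerStep_empty]
    apply PySem.Dict.ext
    rw [PySem.Dict.items_insert_of_not_contains _ _
        (by rw [pvMapAgg_contains]; exact hcont')]
    rw [pvMapAgg, pvMapAgg]
    show (List.map _ g.items) ++ _ = List.map _ (PySem.Dict.insert g _ _).items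
    rw [PySem.Dict.items_insert_of_not_contains _ _ hcont', List.map_append, hgetD]
    rfl

lemma pvStepG_nodup (g : PySem.Dict Int (List (List Int))) (mod : List Int)
    (hnd : g.keys.Nodup) : (pvStepG g mod).keys.Nodup := by
  have := PySem.Dict.nodup_keys_foldl_modify_key [mod]
    (fun m => PySem.List.pyGetD m 4 0) [] (fun _ m old => old ++ [m]) g hnd
  simpa [pvStepG] using this

lemma pvStepG_ne_nil (g : PySem.Dict Int (List (List Int))) (mod : List Int)
    (hne : ∀ p ∈ g.items, p.2 ≠ []) : ∀ p ∈ (pvStepG g mod).items, p.2 ≠ [] := by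
  intro p hp
  rw [pvStepG, PySem.Dict.modify] at hp
  by_cases hcont : g.contains (PySem.List.pyGetD mod 4 0) = true
  · rw [PySem.Dict.items_insert_of_contains _ _ hcont] at hp
    obtain ⟨q, hq, rfl⟩ := List.mem_map.mp hp
    split
    · simp
    · exact hne q hq
  · rw [PySem.Dict.items_insert_of_not_contains _ _ (by simpa using hcont)] at hp
    rcases List.mem_append.mp hp with h | h
    · exact hne p h
    · simp at h; subst h; simp

lemma pvFoldG_nodup (l : List (List Int)) (g : PySem.Dict Int (List (List Int)))
    (hnd : g.keys.Nodup) : (l.foldl pvStepG g).keys.Nodup := by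
  induction l generalizing g with
  | nil => exact hnd
  | cons mod rest ih => exact ih _ (pvStepG_nodup g mod hnd)

lemma pvMain (l : List (List Int)) (g : PySem.Dict Int (List (List Int)))
    (hnd : g.keys.Nodup) (hne : ∀ p ∈ g.items, p.2 ≠ []) :
    l.foldl pvStepA (pvMapAgg g) = pvMapAgg (l.foldl pvStepG g) := by
  induction l generalizing g with
  | nil => rfl
  | cons mod rest ih =>
      simp only [List.foldl_cons, pvStep_comm g mod hnd hne]
      exact ih _ (pvStepG_nodup g mod hnd) (pvStepG_ne_nil g mod hne)

-- ===== VERDICT (by name: the statement is the Claim_ definition above) =====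
theorem get_category_max_dims_spec : Claim_equal_get_category_max_dims := by
  intro inlist _ _
  unfold Spec_get_category_max_dims get_category_max_dims get_category_max_dims_alt
  have hmain : inlist.foldl pvStepA PySem.Dict.empty
      = pvMapAgg (inlist.foldl pvStepG PySem.Dict.empty) :=
    pvMain inlist PySem.Dict.empty (by simp) (by simp [PySem.Dict.empty])
  rw [hmain]
  set G := inlist.foldl pvStepG PySem.Dict.empty with hG
  have hndG : G.keys.Nodup := pvFoldG_nodup inlist PySem.Dict.empty (by simp)
  have hfresh : (G.items.foldl (fun r p => r.insert p.1 (pvAgg p.2)) PySem.Dict.empty).items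
      = G.items.map (fun p => (p.1, pvAgg p.2)) := by
    have h := PySem.Dict.items_foldl_insert_fresh G.items Prod.fst (fun p => pvAgg p.2)
      PySem.Dict.empty (by intro a _; rfl) (by simpa [PySem.Dict.keys] using hndG)
    simpa using h
  simp only [hfresh, pvMapAgg, List.map_map, Function.comp_def]
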